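-- pv_equiv track=rewrite | github.com/HuYuanFudan/openclaw | knowledgegraph/knowledgegraph/companynameparser/parseror.py | link_near_words
-- ===== SOURCE A (Python) =====
-- def link_near_words(tokens):
--     new_tokens = []
--     if not tokens:
--         return new_tokens
--     i = 0
--     w, p, q = tokens[i]
--     while i < len(tokens):
--         i += 1
--         if i == len(tokens):
--             new_tokens.append((w, p, q))
--         else:
--             w_i, p_i, q_i = tokens[i]
--             if p_i == q:
--                 w = w + w_i
--                 p = p
--                 q = q_i
--             else:
--                 new_tokens.append((w, p, q))
--                 w, p, q = tokens[i]
--     return new_tokens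
-- ===== SOURCE B (Python) =====
-- def link_near_words(tokens):
--     if not tokens:
--         return []
--     w, p, q = tokens[0]
--     rest = link_near_words(tokens[1:])
--     if rest and rest[0][1] == q:
--         w2, p2, q2 = rest[0]
--         return [(w + w2, p, q2)] + rest[1:]
--     return [(w, p, q)] + rest
-- ===== Notes on version B (the rewrite author's own statement) =====
-- stated objective: alternative
-- what changed: Replaced A's left-to-right while loop with mutable running triple and append-on-flush by a right-to-left structural recursion that links each token into the head of the already-merged suffix.
import Mathlib
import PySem

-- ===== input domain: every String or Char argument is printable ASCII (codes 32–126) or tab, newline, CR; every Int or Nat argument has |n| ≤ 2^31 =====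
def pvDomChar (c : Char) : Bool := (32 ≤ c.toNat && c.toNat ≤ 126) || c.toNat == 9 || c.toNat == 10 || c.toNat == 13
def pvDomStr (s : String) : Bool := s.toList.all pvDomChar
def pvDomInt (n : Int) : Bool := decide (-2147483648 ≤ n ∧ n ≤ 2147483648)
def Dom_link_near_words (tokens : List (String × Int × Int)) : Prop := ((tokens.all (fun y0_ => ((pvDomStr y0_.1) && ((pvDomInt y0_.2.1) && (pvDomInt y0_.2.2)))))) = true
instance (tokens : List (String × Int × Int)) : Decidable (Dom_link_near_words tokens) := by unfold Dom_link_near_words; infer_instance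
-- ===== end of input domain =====

-- B replaces A's left-to-right accumulate-and-flush loop by a right-to-left recursion
-- that merges each token into the head of the already-linked suffix (objective: alternative).


-- ===== PORT A =====
-- the while loop, carried as structural recursion over the remaining tokens,
-- with new_tokens as the accumulator `acc` and the running triple (w, p, q)
def linkNearWordsLoop (acc : List (String × Int × Int)) (w : String) (p q : Int) :
    List (String × Int × Int) → List (String × Int × Int)
  | [] => acc ++ [(w, p, q)]
  | (wi, pi, qi) :: rest =>
    if pi = q then linkNearWordsLoop acc (w ++ wi) p qi rest
    else linkNearWordsLoop (acc ++ [(w, p, q)]) wi pi qi rest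

def link_near_words (tokens : List (String × Int × Int)) : List (String × Int × Int) :=
  match tokens with
  | [] => []
  | (w, p, q) :: rest => linkNearWordsLoop [] w p q rest

-- ===== PORT B =====
def link_near_words_alt : List (String × Int × Int) → List (String × Int × Int)
  | [] => []
  | (w, p, q) :: ts =>
    match link_near_words_alt ts with
    | (w2, p2, q2) :: rest =>
      if p2 = q then (w ++ w2, p, q2) :: rest else (w, p, q) :: (w2, p2, q2) :: rest
    | [] => [(w, p, q)]

-- ===== PRECONDITION & SPEC =====
def Spec_link_near_words (tokens : List (String × Int × Int)) (out : List (String × Int × Int)) : Prop := out = link_near_words_alt tokens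
instance (tokens : List (String × Int × Int)) (out : List (String × Int × Int)) : Decidable (Spec_link_near_words tokens out) := by unfold Spec_link_near_words; infer_instance

-- ===== CLAIM (what is proved, stated in full; the proofs are below) =====
def Claim_equal_link_near_words : Prop := ∀ (tokens : List (String × Int × Int)), Dom_link_near_words tokens → Spec_link_near_words tokens (link_near_words tokens)

-- ===== LEMMAS AND PROOFS =====

-- one step of B: merge a token onto the front of an already-linked list
def pvGlue (t : String × Int × Int) (l : List (String × Int × Int)) : List (String × Int × Int) :=
  match t, l with
  | (w, p, q), (w2, p2, q2) :: rest =>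
    if p2 = q then (w ++ w2, p, q2) :: rest else (w, p, q) :: (w2, p2, q2) :: rest
  | (w, p, q), [] => [(w, p, q)]

theorem alt_cons (t : String × Int × Int) (ts : List (String × Int × Int)) :
    link_near_words_alt (t :: ts) = pvGlue t (link_near_words_alt ts) := by
  obtain ⟨w, p, q⟩ := t
  simp only [link_near_words_alt]
  cases link_near_words_alt ts with
  | nil => rfl
  | cons u us => obtain ⟨w2, p2, q2⟩ := u; rfl

theorem loop_eq (ts : List (String × Int × Int)) :
    ∀ (acc : List (String × Int × Int)) (w : String) (p q : Int),
      linkNearWordsLoop acc w p q ts = acc ++ pvGlue (w, p, q) (link_near_words_alt ts) := by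
  induction ts with
  | nil => intro acc w p q; simp [linkNearWordsLoop, link_near_words_alt, pvGlue]
  | cons t rest ih =>
    obtain ⟨wi, pi, qi⟩ := t
    intro acc w p q
    rw [alt_cons]
    simp only [linkNearWordsLoop]
    by_cases h : pi = q
    · subst h
      rw [if_pos rfl, ih]
      cases hr : link_near_words_alt rest with
      | nil => simp [pvGlue]
      | cons u us =>
        obtain ⟨w2, p2, q2⟩ := u
        by_cases h2 : p2 = qi
        · subst h2
          simp [pvGlue, String.append_assoc]
        · simp [pvGlue, h2]
    · rw [if_neg h, ih]
      cases hr : link_near_words_alt rest with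
      | nil => simp [pvGlue, h]
      | cons u us =>
        obtain ⟨w2, p2, q2⟩ := u
        by_cases h2 : p2 = qi
        · subst h2; simp [pvGlue, h]
        · simp [pvGlue, h, h2]

-- ===== VERDICT (by name: the statement is the Claim_ definition above) =====
theorem link_near_words_spec : Claim_equal_link_near_words := by
  intro tokens _
  unfold Spec_link_near_words
  cases tokens with
  | nil => rfl
  | cons t rest =>
    obtain ⟨w, p, q⟩ := t
    rw [alt_cons]
    simp only [link_near_words]
    rw [loop_eq]
    simp
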